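-- pv_equiv track=rewrite | github.com/theperiperi/Advent-of-Code-2024 | day14/part2/solution.py | calc_safety
-- ===== SOURCE A (Python) =====
-- def calc_pos(robot, sec):
--     # Calculate robot position at given second
--     (x,y), (dx,dy) = robot
--     return ((x + sec * dx) % 101, (y + sec * dy) % 103)
--
-- def calc_safety(robots, sec):
--     # Calculate safety score based on robot distribution in quadrants
--     q1 = q2 = q3 = q4 = 0
--     for robot in robots:
--         x, y = calc_pos(robot, sec)
--         if x < 50:
--             if y < 51:
--                 q1 += 1
--             elif y > 51:
--                 q2 += 1
--         elif x > 50: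
--             if y < 51:
--                 q3 += 1
--             if y > 51:
--                 q4 += 1
--     return q1 * q2 * q3 * q4
-- ===== SOURCE B (Python) =====
-- def calc_safety(robots, sec):
--     # Divide and conquer: each robot contributes a 4-dim unit vector (zero on the
--     # boundary lines x==50 / y==51); quadrant counts are the vector sum, computed
--     # by recursively splitting the list in half and adding the two halves.
--     def unit(robot):
--         (x, y), (dx, dy) = robot
--         px = (x + sec * dx) % 101
--         py = (y + sec * dy) % 103
--         if px == 50 or py == 51:
--             return (0, 0, 0, 0)
--         i = (2 if px > 50 else 0) + (1 if py > 51 else 0)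
--         v = [0, 0, 0, 0]
--         v[i] = 1
--         return tuple(v)
--
--     def quads(lo, hi):
--         if hi - lo == 0:
--             return (0, 0, 0, 0)
--         if hi - lo == 1:
--             return unit(robots[lo])
--         mid = (lo + hi) // 2
--         a = quads(lo, mid)
--         b = quads(mid, hi)
--         return (a[0] + b[0], a[1] + b[1], a[2] + b[2], a[3] + b[3])
--
--     q1, q2, q3, q4 = quads(0, len(robots))
--     return q1 * q2 * q3 * q4
-- ===== Notes on version B (the rewrite author's own statement) =====
-- stated objective: alternative
-- what changed: Replaces A's single stateful loop with branching counter updates by a divide-and-conquer tree recursion: each robot is mapped to a 4-component unit count vector (zero on the boundary lines) and the quadrant counts are obtained by recursively splitting the list in half and adding the halves' vectors.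
import Mathlib
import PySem

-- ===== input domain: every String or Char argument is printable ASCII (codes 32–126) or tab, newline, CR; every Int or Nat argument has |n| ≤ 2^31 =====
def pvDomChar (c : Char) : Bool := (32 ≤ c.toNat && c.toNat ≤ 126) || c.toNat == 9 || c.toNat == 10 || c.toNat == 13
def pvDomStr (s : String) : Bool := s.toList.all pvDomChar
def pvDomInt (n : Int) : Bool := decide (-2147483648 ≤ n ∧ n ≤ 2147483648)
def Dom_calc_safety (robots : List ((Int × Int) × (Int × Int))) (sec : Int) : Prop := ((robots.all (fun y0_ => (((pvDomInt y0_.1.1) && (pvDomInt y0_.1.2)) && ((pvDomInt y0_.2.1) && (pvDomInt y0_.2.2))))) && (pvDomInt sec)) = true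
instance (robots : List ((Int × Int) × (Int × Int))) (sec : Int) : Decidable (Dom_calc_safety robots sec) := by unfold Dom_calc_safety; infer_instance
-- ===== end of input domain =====

-- B replaces A's single stateful counter loop by a divide-and-conquer tree recursion
-- over per-robot unit count vectors (return value only; neither program mutates inputs).

-- ===== PORT A =====
-- helper calc_pos of A
def calcPos (robot : (Int × Int) × (Int × Int)) (sec : Int) : Int × Int :=
  let x := robot.1.1; let y := robot.1.2; let dx := robot.2.1; let dy := robot.2.2
  (PySem.Int.mod (x + sec * dx) 101, PySem.Int.mod (y + sec * dy) 103)

-- the loop of A: fold over robots maintaining the four counters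
def calcSafetyLoop (robots : List ((Int × Int) × (Int × Int))) (sec : Int)
    (q1 q2 q3 q4 : Int) : Int × Int × Int × Int :=
  match robots with
  | [] => (q1, q2, q3, q4)
  | r :: rs =>
    let p := calcPos r sec
    let x := p.1; let y := p.2
    if x < 50 then
      if y < 51 then calcSafetyLoop rs sec (q1 + 1) q2 q3 q4
      else if y > 51 then calcSafetyLoop rs sec q1 (q2 + 1) q3 q4
      else calcSafetyLoop rs sec q1 q2 q3 q4
    else if x > 50 then
      -- A uses two separate ifs here (not elif); they are mutually exclusive
      if y < 51 then calcSafetyLoop rs sec q1 q2 (q3 + 1) q4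
      else if y > 51 then calcSafetyLoop rs sec q1 q2 q3 (q4 + 1)
      else calcSafetyLoop rs sec q1 q2 q3 q4
    else calcSafetyLoop rs sec q1 q2 q3 q4

def calc_safety (robots : List ((Int × Int) × (Int × Int))) (sec : Int) : Int :=
  let q := calcSafetyLoop robots sec 0 0 0 0
  q.1 * q.2.1 * q.2.2.1 * q.2.2.2

-- ===== PORT B =====
-- unit(robot): the 4-component unit count vector of one robot (v[i] = 1 rendered as a case split on i)
def unitVec (robot : (Int × Int) × (Int × Int)) (sec : Int) : Int × Int × Int × Int :=
  let px := PySem.Int.mod (robot.1.1 + sec * robot.2.1) 101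
  let py := PySem.Int.mod (robot.1.2 + sec * robot.2.2) 103
  if px = 50 ∨ py = 51 then (0, 0, 0, 0)
  else
    let i : Int := (if px > 50 then 2 else 0) + (if py > 51 then 1 else 0)
    if i = 0 then (1, 0, 0, 0)
    else if i = 1 then (0, 1, 0, 0)
    else if i = 2 then (0, 0, 1, 0)
    else (0, 0, 0, 1)

-- quads(lo, hi) of B: divide-and-conquer over the index range; indices are the
-- natural-number positions 0 ≤ lo ≤ hi ≤ robots.length that Python's recursion visits,
-- so robots[lo] is ported as getD with an irrelevant default (always in range).
def quadsDC (robots : List ((Int × Int) × (Int × Int))) (sec : Int) (lo hi : Nat) :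
    Int × Int × Int × Int :=
  if hi - lo = 0 then (0, 0, 0, 0)
  else if hi - lo = 1 then unitVec (robots.getD lo ((0, 0), (0, 0))) sec
  else
    let mid := (lo + hi) / 2
    let a := quadsDC robots sec lo mid
    let b := quadsDC robots sec mid hi
    (a.1 + b.1, a.2.1 + b.2.1, a.2.2.1 + b.2.2.1, a.2.2.2 + b.2.2.2)
  termination_by hi - lo
  decreasing_by all_goals omega

def calc_safety_alt (robots : List ((Int × Int) × (Int × Int))) (sec : Int) : Int :=
  let q := quadsDC robots sec 0 robots.length
  q.1 * q.2.1 * q.2.2.1 * q.2.2.2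

-- ===== PRECONDITION & SPEC =====
def Spec_calc_safety (robots : List ((Int × Int) × (Int × Int))) (sec : Int) (out : Int) : Prop := out = calc_safety_alt robots sec
instance (robots : List ((Int × Int) × (Int × Int))) (sec : Int) (out : Int) : Decidable (Spec_calc_safety robots sec out) := by unfold Spec_calc_safety; infer_instance

-- ===== CLAIM (what is proved, stated in full; the proofs are below) =====
def Claim_equal_calc_safety : Prop := ∀ (robots : List ((Int × Int) × (Int × Int))) (sec : Int), Dom_calc_safety robots sec → Spec_calc_safety robots sec (calc_safety robots sec)

-- ===== LEMMAS AND PROOFS =====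

-- the four quadrant counts of a robot segment, in A's predicate form
def segCnt (xs : List ((Int × Int) × (Int × Int))) (sec : Int) : Int × Int × Int × Int :=
  ((xs.map (fun r => calcPos r sec)).countP (fun p => decide (p.1 < 50 ∧ p.2 < 51)),
   (xs.map (fun r => calcPos r sec)).countP (fun p => decide (p.1 < 50 ∧ p.2 > 51)),
   (xs.map (fun r => calcPos r sec)).countP (fun p => decide (p.1 > 50 ∧ p.2 < 51)),
   (xs.map (fun r => calcPos r sec)).countP (fun p => decide (p.1 > 50 ∧ p.2 > 51)))

-- A's loop result: each final counter is the initial counter plus its quadrant count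
theorem calcSafetyLoop_eq (robots : List ((Int × Int) × (Int × Int))) (sec : Int)
    (q1 q2 q3 q4 : Int) :
    calcSafetyLoop robots sec q1 q2 q3 q4 =
      (q1 + (segCnt robots sec).1, q2 + (segCnt robots sec).2.1,
       q3 + (segCnt robots sec).2.2.1, q4 + (segCnt robots sec).2.2.2) := by
  induction robots generalizing q1 q2 q3 q4 with
  | nil => simp [calcSafetyLoop, segCnt]
  | cons r rs ih =>
    simp only [calcSafetyLoop, segCnt, List.map_cons, List.countP_cons]
    by_cases h1 : (calcPos r sec).1 < 50 <;> by_cases h2 : (calcPos r sec).2 < 51 <;>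
      by_cases h3 : (calcPos r sec).2 > 51 <;> by_cases h4 : (calcPos r sec).1 > 50 <;>
      simp [h1, h2, h3, h4, ih, segCnt] <;> omega

-- one robot's unit vector is the quadrant count of the singleton segment
theorem unit_core (px py : Int) :
    (if px = 50 ∨ py = 51 then ((0:Int), (0:Int), (0:Int), (0:Int))
     else
       let i : Int := (if px > 50 then 2 else 0) + (if py > 51 then 1 else 0)
       if i = 0 then (1, 0, 0, 0)
       else if i = 1 then (0, 1, 0, 0)
       else if i = 2 then (0, 0, 1, 0)
       else (0, 0, 0, 1)) =
    ((if px < 50 ∧ py < 51 then 1 else 0),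
     (if px < 50 ∧ py > 51 then 1 else 0),
     (if px > 50 ∧ py < 51 then 1 else 0),
     (if px > 50 ∧ py > 51 then 1 else 0)) := by
  split_ifs <;> simp_all <;> omega

theorem unitVec_eq_segCnt (r : (Int × Int) × (Int × Int)) (sec : Int) :
    unitVec r sec = segCnt [r] sec := by
  show (if PySem.Int.mod (r.1.1 + sec * r.2.1) 101 = 50 ∨ PySem.Int.mod (r.1.2 + sec * r.2.2) 103 = 51
        then ((0:Int), (0:Int), (0:Int), (0:Int))
        else
          let i : Int := (if PySem.Int.mod (r.1.1 + sec * r.2.1) 101 > 50 then 2 else 0) +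
                         (if PySem.Int.mod (r.1.2 + sec * r.2.2) 103 > 51 then 1 else 0)
          if i = 0 then (1, 0, 0, 0)
          else if i = 1 then (0, 1, 0, 0)
          else if i = 2 then (0, 0, 1, 0)
          else (0, 0, 0, 1)) = segCnt [r] sec
  rw [unit_core]
  simp [segCnt, calcPos]

-- segCnt distributes over append (componentwise)
theorem segCnt_append (xs ys : List ((Int × Int) × (Int × Int))) (sec : Int) :
    segCnt (xs ++ ys) sec =
      ((segCnt xs sec).1 + (segCnt ys sec).1,
       (segCnt xs sec).2.1 + (segCnt ys sec).2.1,
       (segCnt xs sec).2.2.1 + (segCnt ys sec).2.2.1,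
       (segCnt xs sec).2.2.2 + (segCnt ys sec).2.2.2) := by
  simp [segCnt, List.countP_append]

-- the divide-and-conquer recursion computes the quadrant counts of robots[lo:hi]
theorem quadsDC_eq (robots : List ((Int × Int) × (Int × Int)) ) (sec : Int) :
    ∀ n lo hi, hi - lo = n → hi ≤ robots.length →
      quadsDC robots sec lo hi = segCnt ((robots.drop lo).take (hi - lo)) sec := by
  intro n
  induction n using Nat.strong_induction_on with
  | _ n ih =>
    intro lo hi hn hlen
    by_cases h0 : hi - lo = 0
    · rw [quadsDC]
      simp [h0, segCnt]
    · by_cases h1 : hi - lo = 1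
      · rw [quadsDC]
        simp only [h1]
        norm_num
        have hlo : lo < robots.length := by omega
        have hseg : (robots.drop lo).take 1 = [robots[lo]] := by
          rw [List.take_one, List.head?_drop, List.getElem?_eq_getElem hlo]
          rfl
        rw [hseg, unitVec_eq_segCnt]
        congr 1
        simp [List.getD, List.getElem?_eq_getElem hlo]
      · rw [quadsDC]
        simp only [h0, h1, if_false]
        have h2 : lo + 2 ≤ hi := by omega
        have hm1 : (lo + hi) / 2 - lo < n := by omega
        have hm2 : hi - (lo + hi) / 2 < n := by omega
        rw [ih _ hm1 lo _ rfl (by omega), ih _ hm2 _ hi rfl hlen]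
        have hh : hi - lo = ((lo + hi) / 2 - lo) + (hi - (lo + hi) / 2) := by omega
        have hd : lo + ((lo + hi) / 2 - lo) = (lo + hi) / 2 := by omega
        rw [hh, List.take_add, List.drop_drop, hd, segCnt_append]

-- ===== VERDICT (by name: the statement is the Claim_ definition above) =====
theorem calc_safety_spec : Claim_equal_calc_safety := by
  intro robots sec _
  unfold Spec_calc_safety calc_safety calc_safety_alt
  rw [calcSafetyLoop_eq, quadsDC_eq robots sec (robots.length - 0) 0 robots.length rfl le_rfl]
  simp
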